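-- pv_equiv track=rewrite | github.com/EeshanMishra/calcudoku-game-project | func_calcudoku.py | validate_cols
-- ===== SOURCE A (Python) =====
-- def validate_cols(grid):
--     for row in range(len(grid[0])):
--         new_list = []
--         for col in range(len(grid)):
--             new_list.append(grid[col][row])
--         for i in range(len(new_list)):  # breaks puzzle up into each column
--             if new_list.count(new_list[i]) > 1 and new_list[i] != 0:  # runs through each row and column and counts each individual value and if the count is greater than 1 then it returns false
--                 return False
--     return True
-- ===== SOURCE B (Python) =====
-- def validate_cols(grid):
--     width = len(grid[0])
--     for r in range(width):
--         vals = sorted(filter(None, (row[r] for row in grid)))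
--         for prev, cur in zip(vals, vals[1:]):
--             if prev == cur:
--                 return False
--     return True
-- ===== Notes on version B (the rewrite author's own statement) =====
-- stated objective: alternative
-- what changed: Per column, instead of re-scanning the whole column with list.count for every element (quadratic per column), B collects the non-zero entries, sorts them, and makes one linear pass comparing adjacent sorted values.
-- outside the precondition, e.g. on validate_cols([[1, 1], [1]]): A returns False, B returns False
import Mathlib
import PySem

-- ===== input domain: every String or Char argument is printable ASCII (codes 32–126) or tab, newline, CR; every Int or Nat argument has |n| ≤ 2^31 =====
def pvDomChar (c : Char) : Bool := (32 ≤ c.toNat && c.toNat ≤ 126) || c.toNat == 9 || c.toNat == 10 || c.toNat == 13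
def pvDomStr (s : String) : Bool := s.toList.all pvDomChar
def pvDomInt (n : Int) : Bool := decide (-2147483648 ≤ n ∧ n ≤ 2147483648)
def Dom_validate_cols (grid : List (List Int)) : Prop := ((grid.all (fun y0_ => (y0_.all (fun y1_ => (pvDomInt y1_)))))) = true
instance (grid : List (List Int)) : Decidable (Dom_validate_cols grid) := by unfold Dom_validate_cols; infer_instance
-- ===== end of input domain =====

-- B replaces A's per-element count-rescan of each column by sort-then-adjacent-compare on the
-- non-zero column entries (alternative decomposition, same result).

-- ===== PORT A =====
-- for row in range(len(grid[0])): build new_list = [grid[col][row] for col], then scan indices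
-- checking new_list.count(new_list[i]) > 1 and new_list[i] != 0; early `return False` → any.
-- (getD defaults are unreachable under Pre_: grid nonempty in range(len(grid[0])), rows long enough.)
def validate_cols (grid : List (List Int)) : Bool :=
  !((List.range (grid.headD []).length).any (fun r =>
      (fun newList =>
        (List.range newList.length).any (fun i =>
          decide (1 < newList.count (newList.getD i 0)) && (newList.getD i 0 != 0)))
      ((List.range grid.length).map (fun c => (grid.getD c []).getD r 0))))

-- ===== PORT B =====
-- `for prev, cur in zip(vals, vals[1:]): if prev == cur: return False` — adjacent-equal scan.
def hasAdjDup : List Int → Bool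
  | a :: b :: t => a == b || hasAdjDup (b :: t)
  | _ => false

-- vals = sorted(filter(None, (row[r] for row in grid)))
def validate_cols_alt (grid : List (List Int)) : Bool :=
  !((List.range (grid.headD []).length).any (fun r =>
      hasAdjDup (PySem.List.sorted
        ((grid.map (fun row => row.getD r 0)).filter (fun v => v != 0))
        (fun x => x) false)))

-- ===== PRECONDITION & SPEC =====
-- Pre_ excludes the inputs where the Python can raise IndexError: the empty grid (grid[0]) and
-- ragged grids in which some row is shorter than the first row (grid[col][row] / row[r]); on a
-- few such ragged grids A still returns False (a duplicate found in an earlier column pre-empts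
-- the IndexError), and B happens to return False there too, but whether they raise depends on
-- column order, so all ragged grids stay outside Pre_.
def Pre_validate_cols (grid : List (List Int)) : Prop :=
  grid ≠ [] ∧ ∀ row ∈ grid, (grid.headD []).length ≤ row.length
instance (grid : List (List Int)) : Decidable (Pre_validate_cols grid) := by
  unfold Pre_validate_cols; infer_instance

def pvWitness_validate_cols : List (List Int) := [[1, 2], [2, 1]]

def Spec_validate_cols (grid : List (List Int)) (out : Bool) : Prop := out = validate_cols_alt grid
instance (grid : List (List Int)) (out : Bool) : Decidable (Spec_validate_cols grid out) := by unfold Spec_validate_cols; infer_instance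

-- ===== CLAIM (what is proved, stated in full; the proofs are below) =====
def Claim_equal_validate_cols : Prop := ∀ (grid : List (List Int)), Dom_validate_cols grid → Pre_validate_cols grid → Spec_validate_cols grid (validate_cols grid)

-- ===== LEMMAS AND PROOFS =====

-- indexing range(len l) through getD is just traversing l
theorem range_map_getD {α β : Type} (l : List α) (d : α) (g : α → β) :
    (List.range l.length).map (fun i => g (l.getD i d)) = l.map g := by
  apply List.ext_getElem
  · simp
  · intro i h1 h2
    simp at h1 h2 ⊢
    rw [List.getElem?_eq_getElem h2, Option.getD_some]

theorem any_range_getD (l : List Int) (p : Int → Bool) :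
    (List.range l.length).any (fun i => p (l.getD i 0)) = l.any p := by
  have h := range_map_getD l 0 (fun x => x)
  calc (List.range l.length).any (fun i => p (l.getD i 0))
      = ((List.range l.length).map (fun i => l.getD i 0)).any p := by
        rw [List.any_map]; rfl
    _ = l.any p := by rw [h]; simp

-- on a ≤-sorted list, an adjacent duplicate is the same as any duplicate
theorem hasAdjDup_iff : ∀ (l : List Int), l.Pairwise (· ≤ ·) →
    (hasAdjDup l = true ↔ ¬ l.Nodup)
  | [], _ => by simp [hasAdjDup]
  | [a], _ => by simp [hasAdjDup]
  | a :: b :: t, h => by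
    have htail : (b :: t).Pairwise (· ≤ ·) := h.of_cons
    have ih := hasAdjDup_iff (b :: t) htail
    by_cases hab : a = b
    · subst hab
      simp [hasAdjDup]
    · have hle : a ≤ b := (List.pairwise_cons.mp h).1 b (by simp)
      have hnotmem : a ∉ b :: t := by
        intro hmem
        rcases List.mem_cons.mp hmem with h1 | h1
        · exact hab h1
        · have : b ≤ a := (List.pairwise_cons.mp htail).1 a h1
          exact hab (le_antisymm hle this)
      simp only [hasAdjDup, List.nodup_cons, hnotmem, not_false_iff, true_and,
        Bool.or_eq_true, beq_iff_eq, hab, false_or]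
      rw [List.nodup_cons] at ih
      exact ih

-- A's per-column duplicate test equals B's sort-then-adjacent test
theorem col_check (l : List Int) :
    (l.any (fun v => decide (1 < l.count v) && (v != 0)))
      = hasAdjDup (PySem.List.sorted (l.filter (fun v => v != 0)) (fun x => x) false) := by
  set m := l.filter (fun v => v != 0) with hm
  have hperm : (PySem.List.sorted m (fun x => x) false).Perm m := PySem.List.sorted_perm m _ _
  have hpw : (PySem.List.sorted m (fun x => x) false).Pairwise (· ≤ ·) :=
    PySem.List.sorted_pairwise m (fun x => x)
  rw [Bool.eq_iff_iff]
  rw [hasAdjDup_iff _ hpw, hperm.nodup_iff]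
  constructor
  · intro h
    rcases List.any_eq_true.mp h with ⟨v, hv, hcond⟩
    simp only [Bool.and_eq_true, decide_eq_true_eq, bne_iff_ne, ne_eq] at hcond
    intro hnd
    have hvm : v ∈ m := by
      rw [hm]; exact List.mem_filter.mpr ⟨hv, by simp [hcond.2]⟩
    have hcount : m.count v = l.count v := by
      rw [hm]; exact List.count_filter (by simp [hcond.2])
    have := List.nodup_iff_count_le_one.mp hnd v
    omega
  · intro h
    rcases not_forall.mp (fun hall => h (List.nodup_iff_count_le_one.mpr hall)) with ⟨v, hv⟩
    simp only [not_le] at hv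
    have hvm : v ∈ m := List.count_pos_iff.mp (by omega)
    have hvl : v ∈ l := (List.mem_filter.mp (hm ▸ hvm)).1
    have hvne : v ≠ 0 := by
      have := (List.mem_filter.mp (hm ▸ hvm)).2
      simpa using this
    have hcount : m.count v = l.count v := by
      rw [hm]; exact List.count_filter (by simp [hvne])
    exact List.any_eq_true.mpr ⟨v, hvl, by
      simp only [Bool.and_eq_true, decide_eq_true_eq, bne_iff_ne, ne_eq]
      exact ⟨by omega, hvne⟩⟩

-- ===== VERDICT (by name: the statement is the Claim_ definition above) =====
theorem validate_cols_spec : Claim_equal_validate_cols := by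
  intro grid _ _
  unfold Spec_validate_cols validate_cols validate_cols_alt
  have key : ∀ (r : Nat),
      ((fun newList =>
        (List.range newList.length).any (fun i =>
          decide (1 < newList.count (newList.getD i 0)) && (newList.getD i 0 != 0)))
      ((List.range grid.length).map (fun c => (grid.getD c []).getD r 0)))
      = hasAdjDup (PySem.List.sorted
          ((grid.map (fun row => row.getD r 0)).filter (fun v => v != 0))
          (fun x => x) false) := by
    intro r
    rw [range_map_getD grid [] (fun row => row.getD r 0)]
    exact (any_range_getD _ _).trans (col_check _)
  simp only [key]
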